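-- pv_equiv track=rewrite | github.com/YJL33/LeetCode | current_session/python/2289.py | totalSteps_DP
-- ===== SOURCE A (Python) =====
-- from typing import List
--
-- def totalSteps_DP(A: List[int]) -> int:
--     n = len(A)
--     dp = [0] * n
--     res = 0
--     stack = []
--     for i in range(n-1, -1, -1):
--         while stack and A[i] > A[stack[-1]]:
--             dp[i] = max(dp[i] + 1, dp[stack.pop()])
--             res = max(res, dp[i])
--         stack.append(i)
--     return res
-- ===== SOURCE B (Python) =====
-- from typing import List
--
-- def totalSteps_DP(A: List[int]) -> int:
--     # Direct round-by-round simulation of the problem statement: each step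
--     # simultaneously removes every element that is smaller than its left
--     # neighbour; count rounds until the list is non-decreasing.
--     arr = list(A)
--     steps = 0
--     while True:
--         nxt = [arr[i] for i in range(len(arr)) if i == 0 or arr[i - 1] <= arr[i]]
--         if len(nxt) == len(arr):
--             return steps
--         steps += 1
--         arr = nxt
-- ===== Notes on version B (the rewrite author's own statement) =====
-- stated objective: alternative
-- what changed: Replaces A's right-to-left monotonic-stack DP (dp array + index stack) by a direct round-by-round simulation of the problem statement: repeatedly delete every element smaller than its left neighbour and count the rounds until the list is non-decreasing, trading A's O(n) for O(n*answer).
import Mathlib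
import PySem

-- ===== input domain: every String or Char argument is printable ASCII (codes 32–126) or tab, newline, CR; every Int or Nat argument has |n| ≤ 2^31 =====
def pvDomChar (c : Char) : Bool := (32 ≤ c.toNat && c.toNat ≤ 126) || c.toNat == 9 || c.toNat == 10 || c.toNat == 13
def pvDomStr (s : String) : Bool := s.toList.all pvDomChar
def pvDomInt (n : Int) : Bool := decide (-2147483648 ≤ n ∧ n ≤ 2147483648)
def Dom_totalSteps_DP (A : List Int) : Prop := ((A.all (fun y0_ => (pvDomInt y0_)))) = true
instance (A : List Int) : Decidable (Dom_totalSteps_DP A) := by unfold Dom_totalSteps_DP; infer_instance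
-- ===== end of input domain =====

-- B replaces A's right-to-left monotonic-stack DP by a direct round-by-round simulation of the
-- problem statement (repeatedly delete every element smaller than its left neighbour, counting
-- rounds); a different algorithm of higher worst-case cost, proved to return the same value.

-- ===== PORT A =====
-- inner 'while stack and A[i] > A[stack[-1]]' loop; the Lean list holds the Python stack
-- top-first (head = stack[-1], pop = tail), a faithful representation of append/pop at the end
def aWhile (Al : List Int) (i : Int) (dp : List Int) (res : Int) (stack : List Int) :
    List Int × Int × List Int :=
  match stack with
  | [] => (dp, res, [])
  | j :: rest =>
    if PySem.List.pyGetD Al i 0 > PySem.List.pyGetD Al j 0 then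
      -- dp[i] = max(dp[i] + 1, dp[stack.pop()]); res = max(res, dp[i])
      let d := max (PySem.List.pyGetD dp i 0 + 1) (PySem.List.pyGetD dp j 0)
      aWhile Al i (PySem.List.pySetD dp i d) (max res d) rest
    else (dp, res, j :: rest)

def totalSteps_DP (A : List Int) : Int :=
  let n : Int := (A.length : Int)
  ((PySem.List.pyRange (n - 1) (-1) (-1)).foldl
    (fun st i =>
      match aWhile A i st.1 st.2.1 st.2.2 with
      | (dp', res', stack') => (dp', res', i :: stack'))
    (List.replicate A.length (0 : Int), (0 : Int), ([] : List Int))).2.1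

-- ===== PORT B =====
-- one round: the comprehension '[arr[i] for i in range(len(arr)) if i == 0 or arr[i-1] <= arr[i]]',
-- written as a recursion carrying the previous ORIGINAL element (exact: element 0 always kept,
-- element i kept iff arr[i-1] <= arr[i])
def keepB (p : Int) : List Int → List Int
  | [] => []
  | y :: t => if p ≤ y then y :: keepB y t else keepB y t

def stepOnce (arr : List Int) : List Int :=
  match arr with
  | [] => []
  | x :: t => x :: keepB x t

-- termination facts for the 'while True' loop (cited by simSteps's decreasing_by)
lemma keepB_sublist (p : Int) (t : List Int) : List.Sublist (keepB p t) t := by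
  induction t generalizing p with
  | nil => simp [keepB]
  | cons y t ih =>
    simp only [keepB]
    split
    · exact List.Sublist.cons₂ y (ih y)
    · exact List.Sublist.cons y (ih y)

lemma stepOnce_length_le (arr : List Int) : (stepOnce arr).length ≤ arr.length := by
  cases arr with
  | nil => simp [stepOnce]
  | cons x t => simpa [stepOnce] using (keepB_sublist x t).length_le

-- the 'while True' loop with the running 'steps' counter
def simSteps (arr : List Int) (steps : Int) : Int :=
  if h : (stepOnce arr).length = arr.length then steps
  else simSteps (stepOnce arr) (steps + 1)
termination_by arr.length
decreasing_by exact lt_of_le_of_ne (stepOnce_length_le arr) h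

def totalSteps_DP_alt (A : List Int) : Int := simSteps A 0

-- ===== PRECONDITION & SPEC =====
def Spec_totalSteps_DP (A : List Int) (out : Int) : Prop := out = totalSteps_DP_alt A
instance (A : List Int) (out : Int) : Decidable (Spec_totalSteps_DP A out) := by unfold Spec_totalSteps_DP; infer_instance

-- ===== CLAIM (what is proved, stated in full; the proofs are below) =====
def Claim_equal_totalSteps_DP : Prop := ∀ (A : List Int), Dom_totalSteps_DP A → Spec_totalSteps_DP A (totalSteps_DP A)

-- ===== LEMMAS AND PROOFS =====

-- ---- proof-side model of A: a stack of (value, steps) pairs (head = top of stack) ----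
def bWhile (num : Int) (cur : Int) (stack : List (Int × Int)) : Int × List (Int × Int) :=
  match stack with
  | [] => (cur, [])
  | (v, s) :: rest =>
    if num > v then bWhile num (max (cur + 1) s) rest
    else (cur, (v, s) :: rest)

def gFold (A : List Int) : Int :=
  (A.reverse.foldl
    (fun st num =>
      match bWhile num 0 st.1 with
      | (cur, stack') => ((num, cur) :: stack', max st.2 cur))
    (([] : List (Int × Int)), (0 : Int))).2

lemma bWhile_le (num : Int) : ∀ (stack : List (Int × Int)) (cur : Int),
    cur ≤ (bWhile num cur stack).1 := by
  intro stack
  induction stack with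
  | nil => intro cur; simp [bWhile]
  | cons p rest ih =>
    intro cur
    obtain ⟨v, s⟩ := p
    simp only [bWhile]
    split
    · exact le_trans (by omega) (ih (max (cur + 1) s))
    · simp

lemma getD_replicate_zero (n : Nat) (j : Int) :
    PySem.List.pyGetD (List.replicate n (0 : Int)) j 0 = 0 := by
  simp only [PySem.List.pyGetD, PySem.List.pyGet?]
  cases h : PySem.List.pyIdx? (List.replicate n (0 : Int)).length j with
  | none => rfl
  | some k =>
    simp only [Option.bind_some, List.getElem?_replicate]
    split <;> rfl

lemma getD_setD_self (dp : List Int) (i d : Int) (h0 : 0 ≤ i) (h1 : i < (dp.length : Int)) :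
    PySem.List.pyGetD (PySem.List.pySetD dp i d) i 0 = d := by
  have hi : i = ((i.toNat : Nat) : Int) := by omega
  have hlt : i.toNat < dp.length := by omega
  rw [hi, PySem.List.pySetD_natCast, PySem.List.pyGetD_natCast]
  simp [List.getD, hlt]

lemma getD_setD_ne (dp : List Int) (i j d : Int) (h0 : 0 ≤ i) (h0' : 0 ≤ j) (hne : j ≠ i) :
    PySem.List.pyGetD (PySem.List.pySetD dp i d) j 0 = PySem.List.pyGetD dp j 0 := by
  have hi : i = ((i.toNat : Nat) : Int) := by omega
  have hj : j = ((j.toNat : Nat) : Int) := by omega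
  have hne' : i.toNat ≠ j.toNat := by omega
  rw [hi, hj, PySem.List.pySetD_natCast, PySem.List.pyGetD_natCast, PySem.List.pyGetD_natCast]
  simp [List.getD, hne']

-- the inner-loop correspondence: A's while loop on (dp, res, index stack) matches the pair-stack
-- while loop, with cur playing the role of dp[i]
lemma while_corr (Al : List Int) (i : Int) :
    ∀ (S dp : List Int) (res cur : Int),
    PySem.List.pyGetD dp i 0 = cur →
    cur ≤ res →
    0 ≤ i → i < (dp.length : Int) →
    (∀ j ∈ S, 0 ≤ j ∧ j ≠ i) →
    (aWhile Al i dp res S).2.1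
      = max res (bWhile (PySem.List.pyGetD Al i 0) cur
          (S.map (fun j => (PySem.List.pyGetD Al j 0, PySem.List.pyGetD dp j 0)))).1
    ∧ PySem.List.pyGetD (aWhile Al i dp res S).1 i 0
      = (bWhile (PySem.List.pyGetD Al i 0) cur
          (S.map (fun j => (PySem.List.pyGetD Al j 0, PySem.List.pyGetD dp j 0)))).1
    ∧ (aWhile Al i dp res S).2.2.map
        (fun j => (PySem.List.pyGetD Al j 0, PySem.List.pyGetD (aWhile Al i dp res S).1 j 0))
      = (bWhile (PySem.List.pyGetD Al i 0) cur
          (S.map (fun j => (PySem.List.pyGetD Al j 0, PySem.List.pyGetD dp j 0)))).2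
    ∧ (∀ j, 0 ≤ j → j ≠ i →
        PySem.List.pyGetD (aWhile Al i dp res S).1 j 0 = PySem.List.pyGetD dp j 0)
    ∧ (aWhile Al i dp res S).1.length = dp.length
    ∧ (∀ j ∈ (aWhile Al i dp res S).2.2, j ∈ S) := by
  intro S
  induction S with
  | nil =>
    intro dp res cur h1 h2 h3 h4 h5
    refine ⟨?_, ?_, ?_, ?_, ?_, ?_⟩
    · simp only [aWhile, bWhile, List.map_nil]; omega
    · exact h1
    · rfl
    · intro _ _ _; rfl
    · rfl
    · intro _ h; exact h
  | cons j rest ih =>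
    intro dp res cur h1 h2 h3 h4 h5
    simp only [aWhile, bWhile, List.map_cons]
    by_cases hc : PySem.List.pyGetD Al i 0 > PySem.List.pyGetD Al j 0
    · rw [if_pos hc, if_pos hc]
      obtain ⟨hj0, hji⟩ := h5 j (by simp)
      have hd : max (cur + 1) (PySem.List.pyGetD Al j 0, PySem.List.pyGetD dp j 0).2
          = max (PySem.List.pyGetD dp i 0 + 1) (PySem.List.pyGetD dp j 0) := by
        rw [h1]
      have hrest : rest.map (fun j' => (PySem.List.pyGetD Al j' 0,
              PySem.List.pyGetD (PySem.List.pySetD dp i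
                (max (PySem.List.pyGetD dp i 0 + 1) (PySem.List.pyGetD dp j 0))) j' 0))
          = rest.map (fun j' => (PySem.List.pyGetD Al j' 0, PySem.List.pyGetD dp j' 0)) :=
        List.map_congr_left fun j' hj' => by
          rw [getD_setD_ne dp i j' _ h3 (h5 j' (List.mem_cons_of_mem _ hj')).1
            (h5 j' (List.mem_cons_of_mem _ hj')).2]
      obtain ⟨c1, c2, c3, c4, c5, c6⟩ :=
        ih (PySem.List.pySetD dp i
            (max (PySem.List.pyGetD dp i 0 + 1) (PySem.List.pyGetD dp j 0)))
          (max res (max (PySem.List.pyGetD dp i 0 + 1) (PySem.List.pyGetD dp j 0)))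
          (max (PySem.List.pyGetD dp i 0 + 1) (PySem.List.pyGetD dp j 0))
          (getD_setD_self dp i _ h3 h4) (le_max_right _ _) h3
          (by rw [PySem.List.length_pySetD]; exact h4)
          (fun j' hj' => h5 j' (List.mem_cons_of_mem _ hj'))
      rw [hrest] at c1 c2 c3
      rw [hd]
      refine ⟨?_, c2, c3, ?_, ?_, fun j' hj' => List.mem_cons_of_mem _ (c6 j' hj')⟩
      · rw [c1, max_assoc, max_eq_right (bWhile_le _ _ _)]
      · intro j' hj0' hne
        rw [c4 j' hj0' hne, getD_setD_ne dp i j' _ h3 hj0' hne]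
      · rw [c5, PySem.List.length_pySetD]
    · rw [if_neg hc, if_neg hc]
      refine ⟨?_, h1, rfl, fun _ _ _ => rfl, rfl, fun _ h => h⟩
      show res = max res cur
      omega

-- the outer-loop correspondence, generalized over the remaining indices
lemma outer_corr (Al : List Int) :
    ∀ (idxs dp : List Int) (res : Int) (S : List Int),
    0 ≤ res →
    dp.length = Al.length →
    idxs.Nodup →
    (∀ j ∈ idxs, 0 ≤ j ∧ j < (Al.length : Int) ∧ j ∉ S ∧ PySem.List.pyGetD dp j 0 = 0) →
    (∀ j ∈ S, 0 ≤ j) →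
    (idxs.foldl
      (fun st i =>
        match aWhile Al i st.1 st.2.1 st.2.2 with
        | (dp', res', stack') => (dp', res', i :: stack'))
      (dp, res, S)).2.1
    = ((idxs.map (fun j => PySem.List.pyGetD Al j 0)).foldl
        (fun st num =>
          match bWhile num 0 st.1 with
          | (cur, stack') => ((num, cur) :: stack', max st.2 cur))
        (S.map (fun j => (PySem.List.pyGetD Al j 0, PySem.List.pyGetD dp j 0)), res)).2 := by
  intro idxs
  induction idxs with
  | nil => intro dp res S _ _ _ _ _; rfl
  | cons i rest ih =>
    intro dp res S hres hlen hnd hidx hS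
    obtain ⟨hi0, hilen, hiS, hdpi⟩ := hidx i (by simp)
    simp only [List.foldl_cons, List.map_cons]
    obtain ⟨c1, c2, c3, c4, c5, c6⟩ :=
      while_corr Al i S dp res 0 hdpi hres hi0 (by omega)
        (fun j hj => ⟨hS j hj, fun he => hiS (he ▸ hj)⟩)
    have hmap : (i :: (aWhile Al i dp res S).2.2).map
          (fun j => (PySem.List.pyGetD Al j 0, PySem.List.pyGetD (aWhile Al i dp res S).1 j 0))
        = (PySem.List.pyGetD Al i 0,
            (bWhile (PySem.List.pyGetD Al i 0) 0
              (S.map (fun j => (PySem.List.pyGetD Al j 0, PySem.List.pyGetD dp j 0)))).1)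
          :: (bWhile (PySem.List.pyGetD Al i 0) 0
              (S.map (fun j => (PySem.List.pyGetD Al j 0, PySem.List.pyGetD dp j 0)))).2 := by
      rw [List.map_cons, c2, c3]
    rw [c1]
    have := ih (aWhile Al i dp res S).1
        (max res (bWhile (PySem.List.pyGetD Al i 0) 0
          (S.map (fun j => (PySem.List.pyGetD Al j 0, PySem.List.pyGetD dp j 0)))).1)
        (i :: (aWhile Al i dp res S).2.2)
        (le_trans hres (le_max_left _ _))
        (by rw [c5]; exact hlen)
        (List.Nodup.of_cons hnd)
        (fun j hj => by
          obtain ⟨hj0, hjlen, hjS, hjdp⟩ := hidx j (List.mem_cons_of_mem _ hj)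
          have hji : j ≠ i := fun he => (List.nodup_cons.mp hnd).1 (he ▸ hj)
          exact ⟨hj0, hjlen,
            by simp only [List.mem_cons]; rintro (he | hm); exact hji he; exact hjS (c6 j hm),
            by rw [c4 j hj0 hji]; exact hjdp⟩)
        (fun j hj => by
          rcases List.mem_cons.mp hj with he | hm
          · exact he ▸ hi0
          · exact hS j (c6 j hm))
    rw [hmap] at this
    exact this

lemma reverse_eq_map_range (A : List Int) :
    A.reverse = (PySem.List.pyRange ((A.length : Int) - 1) (-1) (-1)).map
      (fun j => PySem.List.pyGetD A j 0) := by
  rw [PySem.List.pyRange_neg_one_eq_reverse, List.map_reverse]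
  have h : ((A.length : Int) - 1 + 1) = (A.length : Int) := by omega
  rw [show (-1 : Int) + 1 = 0 from rfl, h, PySem.List.map_pyGetD_pyRange_zero']

lemma A_eq_gFold (A : List Int) : totalSteps_DP A = gFold A := by
  unfold totalSteps_DP gFold
  rw [reverse_eq_map_range A]
  have h := outer_corr A (PySem.List.pyRange ((A.length : Int) - 1) (-1) (-1))
      (List.replicate A.length 0) 0 [] le_rfl (by simp)
      (by
        rw [PySem.List.pyRange_neg_one_eq_reverse]
        exact List.nodup_reverse.mpr (PySem.List.nodup_pyRange_one _ _))
      (by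
        intro j hj
        rw [PySem.List.mem_pyRange_neg_one] at hj
        exact ⟨by omega, by omega, by simp, getD_replicate_zero _ _⟩)
      (by simp)
  simpa using h

-- ---- the pair-stack machine as a structural recursion ----
def gRec : List Int → List (Int × Int) × Int
  | [] => ([], 0)
  | a :: l =>
    ((a, (bWhile a 0 (gRec l).1).1) :: (bWhile a 0 (gRec l).1).2,
      max (gRec l).2 (bWhile a 0 (gRec l).1).1)

lemma foldl_rev_gRec : ∀ (l : List Int),
    l.reverse.foldl
      (fun st num =>
        match bWhile num 0 st.1 with
        | (cur, stack') => ((num, cur) :: stack', max st.2 cur))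
      (([] : List (Int × Int)), (0 : Int)) = gRec l := by
  intro l
  induction l with
  | nil => rfl
  | cons a l ih =>
    rw [List.reverse_cons, List.foldl_append, ih]
    simp only [List.foldl_cons, List.foldl_nil, gRec]

lemma gFold_eq_gRec (A : List Int) : gFold A = (gRec A).2 := by
  unfold gFold
  rw [foldl_rev_gRec]

-- ---- basic facts about the simulation ----
lemma stepOnce_sublist (l : List Int) : List.Sublist (stepOnce l) l := by
  cases l with
  | nil => simp [stepOnce]
  | cons x t => exact List.Sublist.cons₂ x (keepB_sublist x t)

lemma stepOnce_eq_iff (l : List Int) : (stepOnce l).length = l.length ↔ stepOnce l = l := by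
  constructor
  · intro h; exact (stepOnce_sublist l).eq_of_length h
  · intro h; rw [h]

lemma simSteps_nil (s : Int) : simSteps [] s = s := by
  rw [simSteps]
  simp [stepOnce]

lemma simSteps_shift_aux : ∀ (n : Nat) (l : List Int), l.length ≤ n → ∀ (s : Int),
    simSteps l s = s + simSteps l 0 := by
  intro n
  induction n with
  | zero =>
    intro l hl s
    have hnil : l = [] := List.length_eq_zero_iff.mp (Nat.le_zero.mp hl)
    subst hnil
    rw [simSteps_nil, simSteps_nil]
    omega
  | succ n ih =>
    intro l hl s
    by_cases h : (stepOnce l).length = l.length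
    · rw [simSteps, dif_pos h]
      conv_rhs => rw [simSteps]
      rw [dif_pos h]
      omega
    · have hlt : (stepOnce l).length < l.length := lt_of_le_of_ne (stepOnce_length_le l) h
      rw [simSteps, dif_neg h]
      conv_rhs => rw [simSteps]
      rw [dif_neg h, ih (stepOnce l) (by omega) (s + 1), ih (stepOnce l) (by omega) (0 + 1)]
      omega

lemma simSteps_shift (l : List Int) (s : Int) : simSteps l s = s + simSteps l 0 :=
  simSteps_shift_aux l.length l le_rfl s

lemma fsim_fix {l : List Int} (h : stepOnce l = l) : totalSteps_DP_alt l = 0 := by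
  unfold totalSteps_DP_alt
  rw [simSteps, dif_pos (by rw [h])]

lemma fsim_step {l : List Int} (h : stepOnce l ≠ l) :
    totalSteps_DP_alt l = 1 + totalSteps_DP_alt (stepOnce l) := by
  unfold totalSteps_DP_alt
  rw [simSteps, dif_neg (fun hc => h ((stepOnce_eq_iff l).mp hc)), simSteps_shift]
  omega

lemma fsim_nonneg_aux : ∀ (n : Nat) (l : List Int), l.length ≤ n → 0 ≤ totalSteps_DP_alt l := by
  intro n
  induction n with
  | zero =>
    intro l hl
    have hnil : l = [] := List.length_eq_zero_iff.mp (Nat.le_zero.mp hl)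
    subst hnil
    rw [fsim_fix (by rfl)]
  | succ n ih =>
    intro l hl
    by_cases h : stepOnce l = l
    · rw [fsim_fix h]
    · have hlt : (stepOnce l).length < l.length :=
        lt_of_le_of_ne (stepOnce_length_le l) (fun hc => h ((stepOnce_eq_iff l).mp hc))
      rw [fsim_step h]
      have := ih (stepOnce l) (by omega)
      omega

lemma fsim_nonneg (l : List Int) : 0 ≤ totalSteps_DP_alt l :=
  fsim_nonneg_aux l.length l le_rfl

lemma keepB_subset {x p : Int} {t : List Int} (h : x ∈ keepB p t) : x ∈ t :=
  (keepB_sublist p t).subset h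

lemma keepB_append (E : List Int) (p v : Int) (B : List Int)
    (h0 : E = [] → p ≤ v) (hE : ∀ e ∈ E, e ≤ v) :
    keepB p (E ++ v :: B) = keepB p E ++ v :: keepB v B := by
  induction E generalizing p with
  | nil =>
    simp only [List.nil_append, keepB]
    rw [if_pos (h0 rfl)]
  | cons e E ih =>
    simp only [List.cons_append, keepB]
    rw [ih e (fun _ => hE e (by simp)) (fun x hx => hE x (by simp [hx]))]
    by_cases hpe : p ≤ e <;> simp [hpe]

lemma stepOnce_append (x : Int) (X' : List Int) (y0 : Int) (Y' : List Int)
    (h : ∀ a ∈ x :: X', a ≤ y0) :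
    stepOnce ((x :: X') ++ y0 :: Y') = stepOnce (x :: X') ++ stepOnce (y0 :: Y') := by
  simp only [stepOnce, List.cons_append]
  rw [keepB_append X' x y0 Y' (fun _ => h x (by simp)) (fun e he => h e (by simp [he]))]

lemma f_append_aux : ∀ (n : Nat) (X : List Int) (y0 : Int) (Y' : List Int),
    X.length + (y0 :: Y').length ≤ n → X ≠ [] → (∀ a ∈ X, a ≤ y0) →
    totalSteps_DP_alt (X ++ y0 :: Y') = max (totalSteps_DP_alt X) (totalSteps_DP_alt (y0 :: Y')) := by
  intro n
  induction n with
  | zero =>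
    intro X y0 Y' hn hX _
    have := List.length_pos_of_ne_nil hX
    omega
  | succ n ih =>
    intro X y0 Y' hn hX hle
    obtain ⟨x, X', rfl⟩ : ∃ x X', X = x :: X' := by
      cases X with
      | nil => exact absurd rfl hX
      | cons x X' => exact ⟨x, X', rfl⟩
    have hS := stepOnce_append x X' y0 Y' hle
    by_cases hfX : stepOnce (x :: X') = x :: X' <;>
      by_cases hfY : stepOnce (y0 :: Y') = y0 :: Y'
    · rw [fsim_fix (by rw [hS, hfX, hfY]), fsim_fix hfX, fsim_fix hfY]; simp
    · -- X fixed, Y steps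
      have hltY : (stepOnce (y0 :: Y')).length < (y0 :: Y').length :=
        lt_of_le_of_ne (stepOnce_length_le _) (fun hc => hfY ((stepOnce_eq_iff _).mp hc))
      have hne : stepOnce ((x :: X') ++ y0 :: Y') ≠ (x :: X') ++ y0 :: Y' := by
        rw [hS, hfX]
        intro hc
        exact hfY (List.append_cancel_left hc)
      have hY' : stepOnce (y0 :: Y') = y0 :: keepB y0 Y' := rfl
      rw [fsim_step hne, fsim_step hfY, hS, hfX, hY',
        ih (x :: X') y0 (keepB y0 Y')
          (by have h2 := hltY; rw [hY'] at h2; simp at h2 hn ⊢; omega) hX hle,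
        fsim_fix hfX]
      have h1 := fsim_nonneg (y0 :: keepB y0 Y')
      rw [← hY'] at h1 ⊢
      omega
    · -- X steps, Y fixed
      have hne : stepOnce ((x :: X') ++ y0 :: Y') ≠ (x :: X') ++ y0 :: Y' := by
        rw [hS, hfY]
        intro hc
        exact hfX (List.append_cancel_right hc)
      have hX' : stepOnce (x :: X') = x :: keepB x X' := rfl
      have hltX : (stepOnce (x :: X')).length < (x :: X').length :=
        lt_of_le_of_ne (stepOnce_length_le _) (fun hc => hfX ((stepOnce_eq_iff _).mp hc))
      rw [fsim_step hne, fsim_step hfX, hS, hfY, hX',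
        ih (x :: keepB x X') y0 Y'
          (by simp [stepOnce] at hltX; simp at hn ⊢; omega) (by simp)
          (fun a ha => hle a (by
            rcases List.mem_cons.mp ha with h' | h'
            · simp [h']
            · exact List.mem_cons_of_mem _ (keepB_subset h'))),
        fsim_fix hfY]
      have h1 := fsim_nonneg (stepOnce (x :: X'))
      rw [hX'] at h1
      omega
    · -- both step
      have hne : stepOnce ((x :: X') ++ y0 :: Y') ≠ (x :: X') ++ y0 :: Y' := by
        rw [hS]
        intro hc
        have hlen := congrArg List.length hc
        simp only [List.length_append] at hlen
        have l1 := stepOnce_length_le (x :: X')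
        have l2 := stepOnce_length_le (y0 :: Y')
        have hltY : (stepOnce (y0 :: Y')).length < (y0 :: Y').length :=
          lt_of_le_of_ne l2 (fun hc2 => hfY ((stepOnce_eq_iff _).mp hc2))
        omega
      have hX' : stepOnce (x :: X') = x :: keepB x X' := rfl
      have hY' : stepOnce (y0 :: Y') = y0 :: keepB y0 Y' := rfl
      have hltX : (stepOnce (x :: X')).length < (x :: X').length :=
        lt_of_le_of_ne (stepOnce_length_le _) (fun hc => hfX ((stepOnce_eq_iff _).mp hc))
      rw [fsim_step hne, fsim_step hfX, fsim_step hfY, hS, hX', hY',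
        ih (x :: keepB x X') y0 (keepB y0 Y')
          (by
            have h2 := keepB_sublist y0 Y' |>.length_le
            simp [stepOnce] at hltX
            simp at hn ⊢; omega)
          (by simp)
          (fun a ha => hle a (by
            rcases List.mem_cons.mp ha with h' | h'
            · simp [h']
            · exact List.mem_cons_of_mem _ (keepB_subset h')))]
      have h1 := fsim_nonneg (x :: keepB x X')
      have h2 := fsim_nonneg (y0 :: keepB y0 Y')
      omega

lemma f_append (X : List Int) (y0 : Int) (Y' : List Int) (hX : X ≠ [])
    (hle : ∀ a ∈ X, a ≤ y0) :
    totalSteps_DP_alt (X ++ y0 :: Y') = max (totalSteps_DP_alt X) (totalSteps_DP_alt (y0 :: Y')) :=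
  f_append_aux (X.length + (y0 :: Y').length) X y0 Y' le_rfl hX hle

lemma keepB_length_le (p : Int) (t : List Int) : (keepB p t).length ≤ t.length :=
  (keepB_sublist p t).length_le

lemma stepOnce_cons_lt {x d : Int} (D' : List Int) (h : d < x) :
    stepOnce (x :: d :: D') = x :: keepB d D' := by
  simp [stepOnce, keepB, not_le.mpr h]

lemma fsim_singleton (x : Int) : totalSteps_DP_alt [x] = 0 := fsim_fix rfl

lemma fsim_cons_step {x d : Int} (D' : List Int) (h : d < x) :
    totalSteps_DP_alt (x :: d :: D') = 1 + totalSteps_DP_alt (x :: keepB d D') := by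
  rw [← stepOnce_cons_lt D' h]
  apply fsim_step
  intro hc
  have hlen := congrArg List.length hc
  have h2 := keepB_length_le d D'
  rw [stepOnce_cons_lt D' h] at hlen
  simp at hlen
  omega

lemma fsim_pair_lt {a v : Int} (h : v < a) : totalSteps_DP_alt [a, v] = 1 := by
  rw [fsim_cons_step [] h]
  simp [keepB, fsim_singleton]

lemma f_head_irrel_aux : ∀ (n : Nat) (D : List Int) (x y : Int), D.length ≤ n →
    (∀ d ∈ D, d < x) → (∀ d ∈ D, d < y) →
    totalSteps_DP_alt (x :: D) = totalSteps_DP_alt (y :: D) := by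
  intro n
  induction n with
  | zero =>
    intro D x y hD _ _
    have : D = [] := List.length_eq_zero_iff.mp (Nat.le_zero.mp hD)
    subst this
    rw [fsim_singleton, fsim_singleton]
  | succ n ih =>
    intro D x y hD hx hy
    cases D with
    | nil => rw [fsim_singleton, fsim_singleton]
    | cons d D' =>
      rw [fsim_cons_step D' (hx d (by simp)), fsim_cons_step D' (hy d (by simp))]
      have hK := keepB_length_le d D'
      rw [ih (keepB d D') x y (by simp at hD; omega)
        (fun k hk => hx k (List.mem_cons_of_mem _ (keepB_subset hk)))
        (fun k hk => hy k (List.mem_cons_of_mem _ (keepB_subset hk)))]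

lemma f_head_irrel (D : List Int) (x y : Int) (hx : ∀ d ∈ D, d < x) (hy : ∀ d ∈ D, d < y) :
    totalSteps_DP_alt (x :: D) = totalSteps_DP_alt (y :: D) :=
  f_head_irrel_aux D.length D x y le_rfl hx hy

lemma f_eat_one {v a : Int} (B : List Int) (hB : ∀ b ∈ B, b < v) (hva : v < a) :
    totalSteps_DP_alt (a :: v :: B) = max 1 (totalSteps_DP_alt (v :: B)) := by
  cases B with
  | nil =>
    rw [fsim_pair_lt hva, fsim_singleton]; omega
  | cons b B0 =>
    have hbv : b < v := hB b (by simp)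
    have h1 : keepB v (b :: B0) = keepB b B0 := by simp [keepB, not_le.mpr hbv]
    rw [fsim_cons_step (b :: B0) hva, fsim_cons_step B0 hbv]
    have h3 : totalSteps_DP_alt (a :: keepB b B0) = totalSteps_DP_alt (v :: keepB b B0) :=
      f_head_irrel (keepB b B0) a v
        (fun k hk => lt_trans (hB k (List.mem_cons_of_mem _ (keepB_subset hk))) hva)
        (fun k hk => hB k (List.mem_cons_of_mem _ (keepB_subset hk)))
    rw [h1, h3]
    have h4 := fsim_nonneg (v :: keepB b B0)
    omega

lemma f_eat_app_aux : ∀ (n : Nat) (E : List Int) (v : Int) (B : List Int) (a : Int),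
    E.length + B.length ≤ n → E ≠ [] → (∀ e ∈ E, e ≤ v) → (∀ e ∈ E, e < a) →
    (∀ b ∈ B, b < v) → v < a →
    totalSteps_DP_alt (a :: (E ++ v :: B)) =
      max (totalSteps_DP_alt (a :: E) + 1) (totalSteps_DP_alt (v :: B)) := by
  intro n
  induction n with
  | zero =>
    intro E v B a hn hE _ _ _ _
    have := List.length_pos_of_ne_nil hE
    omega
  | succ n ih =>
    intro E v B a hn hE hEv hEa hB hva
    obtain ⟨e, E0, rfl⟩ : ∃ e E0, E = e :: E0 := by
      cases E with
      | nil => exact absurd rfl hE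
      | cons e E0 => exact ⟨e, E0, rfl⟩
    have hea : e < a := hEa e (by simp)
    have hkapp : keepB e (E0 ++ v :: B) = keepB e E0 ++ v :: keepB v B :=
      keepB_append E0 e v B (fun _ => hEv e (by simp)) (fun x hx => hEv x (by simp [hx]))
    have hbig : totalSteps_DP_alt (a :: ((e :: E0) ++ v :: B))
        = 1 + totalSteps_DP_alt (a :: (keepB e E0 ++ v :: keepB v B)) := by
      rw [show (e :: E0) ++ v :: B = e :: (E0 ++ v :: B) from rfl,
        fsim_cons_step (E0 ++ v :: B) hea, hkapp]
    have hsmall : totalSteps_DP_alt (a :: e :: E0) = 1 + totalSteps_DP_alt (a :: keepB e E0) :=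
      fsim_cons_step E0 hea
    have hE'mem : ∀ k ∈ keepB e E0, k ∈ e :: E0 :=
      fun k hk => List.mem_cons_of_mem _ (keepB_subset hk)
    by_cases hE' : keepB e E0 = []
    · -- the whole left part is eaten in one round
      rw [hE'] at hbig hsmall
      rw [fsim_singleton] at hsmall
      cases B with
      | nil =>
        simp only [keepB, List.nil_append] at hbig
        rw [hbig, hsmall, fsim_pair_lt hva, fsim_singleton]
        omega
      | cons b B0 =>
        have hbv : b < v := hB b (by simp)
        have h1 : keepB v (b :: B0) = keepB b B0 := by simp [keepB, not_le.mpr hbv]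
        have h2 : totalSteps_DP_alt (v :: b :: B0) = 1 + totalSteps_DP_alt (v :: keepB b B0) :=
          fsim_cons_step B0 hbv
        have h3 : totalSteps_DP_alt (a :: v :: keepB b B0)
            = max 1 (totalSteps_DP_alt (v :: keepB b B0)) :=
          f_eat_one (keepB b B0) (fun k hk => hB k (List.mem_cons_of_mem _ (keepB_subset hk))) hva
        rw [h1] at hbig
        simp only [List.nil_append] at hbig
        rw [hbig, hsmall, h2, h3]
        have h4 := fsim_nonneg (v :: keepB b B0)
        omega
    · have hlenE' : (keepB e E0).length ≤ E0.length := keepB_length_le e E0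
      cases B with
      | nil =>
        have hIH := ih (keepB e E0) v [] a (by simp at hn ⊢; omega) hE'
          (fun k hk => hEv k (hE'mem k hk)) (fun k hk => hEa k (hE'mem k hk))
          (by simp) hva
        simp only [keepB] at hbig
        rw [hbig, hIH, hsmall, fsim_singleton]
        have h4 := fsim_nonneg (a :: keepB e E0)
        omega
      | cons b B0 =>
        have hbv : b < v := hB b (by simp)
        have h1 : keepB v (b :: B0) = keepB b B0 := by simp [keepB, not_le.mpr hbv]
        have h2 : totalSteps_DP_alt (v :: b :: B0) = 1 + totalSteps_DP_alt (v :: keepB b B0) :=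
          fsim_cons_step B0 hbv
        have hIH := ih (keepB e E0) v (keepB b B0) a
          (by have := keepB_length_le b B0; simp at hn ⊢; omega) hE'
          (fun k hk => hEv k (hE'mem k hk)) (fun k hk => hEa k (hE'mem k hk))
          (fun k hk => hB k (List.mem_cons_of_mem _ (keepB_subset hk))) hva
        rw [h1] at hbig
        rw [hbig, hIH, hsmall, h2]
        have h4 := fsim_nonneg (a :: keepB e E0)
        have h5 := fsim_nonneg (v :: keepB b B0)
        omega

lemma f_eat_app (E : List Int) (v : Int) (B : List Int) (a : Int) (hE : E ≠ [])
    (hEv : ∀ e ∈ E, e ≤ v) (hEa : ∀ e ∈ E, e < a) (hB : ∀ b ∈ B, b < v) (hva : v < a) :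
    totalSteps_DP_alt (a :: (E ++ v :: B)) =
      max (totalSteps_DP_alt (a :: E) + 1) (totalSteps_DP_alt (v :: B)) :=
  f_eat_app_aux (E.length + B.length) E v B a le_rfl hE hEv hEa hB hva

-- ---- block decomposition: the pair stack cuts the list into independent blocks ----
def conc (bs : List (Int × List Int)) : List Int := bs.flatMap (fun p => p.1 :: p.2)

def goodB (bs : List (Int × List Int)) : Prop :=
  List.Pairwise (fun p q => p.1 ≤ q.1) bs ∧ ∀ p ∈ bs, ∀ b ∈ p.2, b < p.1

def stks (bs : List (Int × List Int)) : List (Int × Int) :=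
  bs.map (fun p => (p.1, totalSteps_DP_alt (p.1 :: p.2)))

lemma conc_cons (v : Int) (B : List Int) (bs : List (Int × List Int)) :
    conc ((v, B) :: bs) = (v :: B) ++ conc bs := by
  simp [conc]

lemma fsim_nil : totalSteps_DP_alt [] = 0 := fsim_fix rfl

lemma f_conc : ∀ (bs : List (Int × List Int)), goodB bs →
    totalSteps_DP_alt (conc bs)
      = (bs.map (fun p => totalSteps_DP_alt (p.1 :: p.2))).foldr max 0 := by
  intro bs
  induction bs with
  | nil => intro _; simpa [conc] using fsim_nil
  | cons p bs' ih =>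
    intro hg
    obtain ⟨v, B⟩ := p
    obtain ⟨hpw, hbl⟩ := hg
    rw [conc_cons]
    cases bs' with
    | nil =>
      simp only [conc, List.flatMap_nil, List.append_nil, List.map_cons, List.map_nil,
        List.foldr_cons, List.foldr_nil]
      have := fsim_nonneg (v :: B)
      omega
    | cons q bs'' =>
      obtain ⟨w, C⟩ := q
      have hvw : v ≤ w := (List.pairwise_cons.mp hpw).1 (w, C) (by simp)
      have hcc : conc ((w, C) :: bs'') = w :: (C ++ conc bs'') := by simp [conc]
      rw [hcc, f_append (v :: B) w (C ++ conc bs'')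
        (by simp)
        (fun x hx => by
          rcases List.mem_cons.mp hx with h' | h'
          · omega
          · exact le_trans (le_of_lt (hbl (v, B) (by simp) x h')) hvw)]
      rw [← hcc, ih ⟨(List.pairwise_cons.mp hpw).2, fun q hq => hbl q (List.mem_cons_of_mem _ hq)⟩]
      simp

lemma bWhile_stks_drop (a : Int) : ∀ (bs : List (Int × List Int)) (c : Int),
    (bWhile a c (stks bs)).2 = stks (bs.dropWhile (fun q => decide (q.1 < a))) := by
  intro bs
  induction bs with
  | nil => intro c; rfl
  | cons p bs' ih =>
    intro c
    obtain ⟨v, B⟩ := p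
    by_cases h : v < a <;> simp [stks, bWhile, h, List.dropWhile] <;> simpa [stks] using ih _

lemma bWhile_fst_ge_popped (a : Int) : ∀ (bs : List (Int × List Int)) (c : Int)
    (p : Int × List Int), p ∈ bs.takeWhile (fun q => decide (q.1 < a)) →
    totalSteps_DP_alt (p.1 :: p.2) ≤ (bWhile a c (stks bs)).1 := by
  intro bs
  induction bs with
  | nil => intro c p hp; simp [List.takeWhile] at hp
  | cons q bs' ih =>
    intro c p hp
    obtain ⟨v, B⟩ := q
    by_cases h : v < a
    · rw [List.takeWhile_cons_of_pos (by simpa using h)] at hp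
      rw [show stks ((v, B) :: bs') = (v, totalSteps_DP_alt (v :: B)) :: stks bs' from rfl]
      rw [show bWhile a c ((v, totalSteps_DP_alt (v :: B)) :: stks bs')
          = bWhile a (max (c + 1) (totalSteps_DP_alt (v :: B))) (stks bs') from by
        simp [bWhile, h]]
      rcases List.mem_cons.mp hp with h' | h'
      · subst h'
        exact le_trans (le_max_right _ _) (bWhile_le a (stks bs') _)
      · exact ih _ p h'
    · rw [List.takeWhile_cons_of_neg (by simpa using h)] at hp
      simp at hp

lemma bWhile_fst_split (a : Int) : ∀ (st1 st2 : List (Int × Int)) (c : Int),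
    (∀ p ∈ st1, p.1 < a) →
    (st2 = [] ∨ ∃ v s t, st2 = (v, s) :: t ∧ ¬ v < a) →
    (bWhile a c (st1 ++ st2)).1 = (bWhile a c st1).1 := by
  intro st1
  induction st1 with
  | nil =>
    intro st2 c _ h2
    rcases h2 with rfl | ⟨v, s, t, rfl, hv⟩
    · rfl
    · simp [bWhile, hv]
  | cons p st1' ih =>
    intro st2 c h1 h2
    obtain ⟨v, s⟩ := p
    have hv : v < a := h1 (v, s) (by simp)
    simp only [List.cons_append, bWhile, if_pos hv]
    exact ih st2 _ (fun q hq => h1 q (List.mem_cons_of_mem _ hq)) h2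

lemma f_push_aux : ∀ (bs : List (Int × List Int)) (a : Int) (P : List Int) (c : Int),
    goodB bs → P ≠ [] → (∀ p ∈ P, p < a) → (∀ p ∈ P, ∀ q ∈ bs, p ≤ q.1) →
    totalSteps_DP_alt (a :: P) = c →
    totalSteps_DP_alt (a :: (P ++ conc bs)) =
      max ((bWhile a c (stks bs)).1)
        (totalSteps_DP_alt (conc (bs.dropWhile (fun q => decide (q.1 < a))))) := by
  intro bs
  induction bs with
  | nil =>
    intro a P c _ _ _ _ hc
    subst hc
    simp only [conc, List.flatMap_nil, List.append_nil, List.dropWhile_nil]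
    have := fsim_nonneg (a :: P)
    rw [show stks ([] : List (Int × List Int)) = [] from rfl]
    rw [show (bWhile a (totalSteps_DP_alt (a :: P)) []).1 = totalSteps_DP_alt (a :: P) from rfl,
      fsim_nil]
    omega
  | cons q bs' ih =>
    intro a P c hg hP hPa hPbs hc
    obtain ⟨v, B⟩ := q
    obtain ⟨hpw, hbl⟩ := hg
    have hBv : ∀ b ∈ B, b < v := hbl (v, B) (by simp)
    by_cases hva : v < a
    · -- pop the top block and continue
      have hPv : ∀ p ∈ P, p ≤ v := fun p hp => hPbs p hp (v, B) (by simp)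
      have hkey := f_eat_app P v B a hP hPv hPa hBv hva
      rw [hc] at hkey
      have hIH := ih a (P ++ v :: B) (max (c + 1) (totalSteps_DP_alt (v :: B)))
        ⟨(List.pairwise_cons.mp hpw).2, fun q hq => hbl q (List.mem_cons_of_mem _ hq)⟩
        (by simp)
        (fun p hp => by
          rcases List.mem_append.mp hp with h' | h'
          · exact hPa p h'
          · rcases List.mem_cons.mp h' with h'' | h''
            · omega
            · exact lt_trans (hBv p h'') hva)
        (fun p hp q hq => by
          have hvq : v ≤ q.1 := (List.pairwise_cons.mp hpw).1 q hq
          rcases List.mem_append.mp hp with h' | h'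
          · exact le_trans (hPbs p h' (v, B) (by simp)) hvq
          · rcases List.mem_cons.mp h' with h'' | h''
            · omega
            · exact le_trans (le_of_lt (hBv p h'')) hvq)
        hkey
      rw [conc_cons, show P ++ ((v :: B) ++ conc bs') = (P ++ v :: B) ++ conc bs' from
        (List.append_assoc _ _ _).symm, hIH]
      rw [show stks ((v, B) :: bs') = (v, totalSteps_DP_alt (v :: B)) :: stks bs' from rfl,
        show bWhile a c ((v, totalSteps_DP_alt (v :: B)) :: stks bs')
          = bWhile a (max (c + 1) (totalSteps_DP_alt (v :: B))) (stks bs') from by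
            simp [bWhile, hva],
        List.dropWhile_cons_of_pos (by simpa using hva)]
    · -- the new element stops here
      have hstop : (bWhile a c (stks ((v, B) :: bs'))).1 = c := by
        simp [stks, bWhile, hva]
      rw [hstop, List.dropWhile_cons_of_neg (by simpa using hva)]
      rw [conc_cons, show a :: (P ++ ((v :: B) ++ conc bs')) = (a :: P) ++ ((v :: B) ++ conc bs') from rfl]
      rw [show (v :: B) ++ conc bs' = v :: (B ++ conc bs') from rfl]
      rw [f_append (a :: P) v (B ++ conc bs') (by simp)
        (fun x hx => by
          rcases List.mem_cons.mp hx with h' | h'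
          · omega
          · exact hPbs x h' (v, B) (by simp))]
      rw [hc]

lemma f_push (bs : List (Int × List Int)) (a : Int) (hg : goodB bs) :
    totalSteps_DP_alt (a :: conc bs) =
      max ((bWhile a 0 (stks bs)).1)
        (totalSteps_DP_alt (conc (bs.dropWhile (fun q => decide (q.1 < a))))) := by
  cases bs with
  | nil =>
    simp only [conc, List.flatMap_nil, List.dropWhile_nil]
    rw [fsim_singleton, fsim_nil]
    rfl
  | cons q bs' =>
    obtain ⟨v, B⟩ := q
    obtain ⟨hpw, hbl⟩ := hg
    have hBv : ∀ b ∈ B, b < v := hbl (v, B) (by simp)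
    by_cases hva : v < a
    · have hbase := f_eat_one B hBv hva
      have hIH := f_push_aux bs' a (v :: B) (max (0 + 1) (totalSteps_DP_alt (v :: B)))
        ⟨(List.pairwise_cons.mp hpw).2, fun q hq => hbl q (List.mem_cons_of_mem _ hq)⟩
        (by simp)
        (fun p hp => by
          rcases List.mem_cons.mp hp with h' | h'
          · omega
          · exact lt_trans (hBv p h') hva)
        (fun p hp q hq => by
          have hvq : v ≤ q.1 := (List.pairwise_cons.mp hpw).1 q hq
          rcases List.mem_cons.mp hp with h' | h'
          · omega
          · exact le_trans (le_of_lt (hBv p h')) hvq)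
        (by rw [hbase]; omega)
      rw [conc_cons, hIH]
      rw [show stks ((v, B) :: bs') = (v, totalSteps_DP_alt (v :: B)) :: stks bs' from rfl,
        show bWhile a 0 ((v, totalSteps_DP_alt (v :: B)) :: stks bs')
          = bWhile a (max (0 + 1) (totalSteps_DP_alt (v :: B))) (stks bs') from by
            simp [bWhile, hva],
        List.dropWhile_cons_of_pos (by simpa using hva)]
    · have hstop : (bWhile a 0 (stks ((v, B) :: bs'))).1 = 0 := by
        simp [stks, bWhile, hva]
      rw [hstop, List.dropWhile_cons_of_neg (by simpa using hva)]
      rw [conc_cons, show (v :: B) ++ conc bs' = v :: (B ++ conc bs') from rfl]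
      rw [show a :: (v :: (B ++ conc bs')) = [a] ++ (v :: (B ++ conc bs')) from rfl]
      rw [f_append [a] v (B ++ conc bs') (by simp)
        (fun x hx => by
          have hxa : x = a := by simpa using hx
          omega)]
      rw [fsim_singleton]

lemma dropWhile_shape {α : Type} (p : α → Bool) (l : List α) :
    l.dropWhile p = [] ∨ ∃ x t, l.dropWhile p = x :: t ∧ p x = false := by
  induction l with
  | nil => exact Or.inl rfl
  | cons y l ih =>
    by_cases h : p y
    · rw [List.dropWhile_cons_of_pos h]; exact ih
    · rw [List.dropWhile_cons_of_neg (by simpa using h)]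
      exact Or.inr ⟨y, l, rfl, by simpa using h⟩

lemma foldr_max_nonneg : ∀ (xs : List Int), 0 ≤ xs.foldr max 0 := by
  intro xs
  induction xs with
  | nil => simp
  | cons x xs ih => simp only [List.foldr_cons]; omega

lemma foldr_max_append (xs ys : List Int) :
    (xs ++ ys).foldr max 0 = max (xs.foldr max 0) (ys.foldr max 0) := by
  induction xs with
  | nil => have := foldr_max_nonneg ys; simp; omega
  | cons x xs ih => simp only [List.cons_append, List.foldr_cons, ih]; omega

lemma foldr_max_le (xs : List Int) (c : Int) (h : ∀ x ∈ xs, x ≤ c) (hc : 0 ≤ c) :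
    xs.foldr max 0 ≤ c := by
  induction xs with
  | nil => simpa
  | cons x xs ih =>
    simp only [List.foldr_cons]
    have h1 := h x (by simp)
    have h2 := ih (fun y hy => h y (List.mem_cons_of_mem _ hy))
    omega

lemma main_invariant : ∀ (l : List Int), ∃ bs, goodB bs ∧ conc bs = l ∧
    gRec l = (stks bs, totalSteps_DP_alt l) := by
  intro l
  induction l with
  | nil =>
    exact ⟨[], ⟨List.Pairwise.nil, by simp⟩, rfl, by rw [fsim_nil]; rfl⟩
  | cons a l ih =>
    obtain ⟨bs, hg, hc, hr⟩ := ih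
    set pred := (fun q : Int × List Int => decide (q.1 < a)) with hpred
    have htw_lt : ∀ q ∈ bs.takeWhile pred, q.1 < a := by
      intro q hq
      have := List.mem_takeWhile_imp hq
      simpa [hpred] using this
    have htw_sub : ∀ q ∈ bs.takeWhile pred, q ∈ bs :=
      fun q hq => (List.takeWhile_sublist pred).subset hq
    have hdw_sub : ∀ q ∈ bs.dropWhile pred, q ∈ bs :=
      fun q hq => (List.dropWhile_sublist pred).subset hq
    have hg_tw : goodB (bs.takeWhile pred) :=
      ⟨hg.1.sublist (List.takeWhile_sublist pred), fun q hq => hg.2 q (htw_sub q hq)⟩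
    have hg_dw : goodB (bs.dropWhile pred) :=
      ⟨hg.1.sublist (List.dropWhile_sublist pred), fun q hq => hg.2 q (hdw_sub q hq)⟩
    -- the first component of the pop loop
    have hsplit : stks bs = stks (bs.takeWhile pred) ++ stks (bs.dropWhile pred) := by
      rw [show stks (bs.takeWhile pred) ++ stks (bs.dropWhile pred)
          = stks (bs.takeWhile pred ++ bs.dropWhile pred) from (List.map_append ..).symm,
        List.takeWhile_append_dropWhile]
    have hcur_split : (bWhile a 0 (stks bs)).1 = (bWhile a 0 (stks (bs.takeWhile pred))).1 := by
      rw [hsplit]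
      apply bWhile_fst_split
      · intro p hp
        obtain ⟨q, hq, rfl⟩ := List.mem_map.mp hp
        exact htw_lt q hq
      · rcases dropWhile_shape pred bs with hnil | ⟨x, t, heq, hx⟩
        · left; rw [hnil]; rfl
        · right
          exact ⟨x.1, totalSteps_DP_alt (x.1 :: x.2), stks t, by rw [heq]; rfl,
            by simpa [hpred] using hx⟩
    -- the value pushed with a is the simulation count of the merged block
    have hcur : totalSteps_DP_alt (a :: conc (bs.takeWhile pred)) = (bWhile a 0 (stks bs)).1 := by
      rw [hcur_split, f_push (bs.takeWhile pred) a hg_tw]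
      rw [List.dropWhile_eq_nil_iff.mpr (fun x hx => by simpa [hpred] using htw_lt x hx)]
      have h1 := bWhile_le a (stks (bs.takeWhile pred)) 0
      rw [show conc [] = [] from rfl, fsim_nil]
      omega
    refine ⟨(a, conc (bs.takeWhile pred)) :: bs.dropWhile pred, ?_, ?_, ?_⟩
    · -- goodB
      constructor
      · apply List.pairwise_cons.mpr
        refine ⟨?_, hg_dw.1⟩
        intro q hq
        rcases dropWhile_shape pred bs with hnil | ⟨x, t, heq, hx⟩
        · rw [hnil] at hq; simp at hq
        · rw [heq] at hq
          have hax : a ≤ x.1 := by simpa [hpred] using hx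
          rcases List.mem_cons.mp hq with h' | h'
          · rw [h']; exact hax
          · have : x.1 ≤ q.1 := by
              have hpw : List.Pairwise (fun p q => p.1 ≤ q.1) (x :: t) := heq ▸ hg_dw.1
              exact (List.pairwise_cons.mp hpw).1 q h'
            omega
      · intro p hp
        rcases List.mem_cons.mp hp with h' | h'
        · subst h'
          intro b hb
          simp only [conc, List.mem_flatMap] at hb
          obtain ⟨q, hq, hbq⟩ := hb
          rcases List.mem_cons.mp hbq with h'' | h''
          · rw [h'']; exact htw_lt q hq
          · exact lt_trans (hg.2 q (htw_sub q hq) b h'') (htw_lt q hq)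
        · exact hg.2 p (hdw_sub p h')
    · rw [conc_cons]
      rw [show (a :: conc (bs.takeWhile pred)) ++ conc (bs.dropWhile pred)
          = a :: (conc (bs.takeWhile pred) ++ conc (bs.dropWhile pred)) from rfl]
      rw [show conc (bs.takeWhile pred) ++ conc (bs.dropWhile pred)
          = conc (bs.takeWhile pred ++ bs.dropWhile pred) from (List.flatMap_append ..).symm,
        List.takeWhile_append_dropWhile, hc]
    · -- gRec equation
      rw [show gRec (a :: l)
          = ((a, (bWhile a 0 (gRec l).1).1) :: (bWhile a 0 (gRec l).1).2,
              max (gRec l).2 (bWhile a 0 (gRec l).1).1) from rfl, hr]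
      have hres : max (totalSteps_DP_alt l) ((bWhile a 0 (stks bs)).1)
          = totalSteps_DP_alt (a :: l) := by
        have hfp := f_push bs a hg
        rw [hc] at hfp
        rw [show (fun q : Int × List Int => decide (q.1 < a)) = pred from hpred.symm] at hfp
        have hfl : totalSteps_DP_alt l
            = (bs.map (fun p => totalSteps_DP_alt (p.1 :: p.2))).foldr max 0 := by
          rw [← hc]; exact f_conc bs hg
        have hfdw := f_conc (bs.dropWhile pred) hg_dw
        have hmaps : bs.map (fun p => totalSteps_DP_alt (p.1 :: p.2))
            = (bs.takeWhile pred).map (fun p => totalSteps_DP_alt (p.1 :: p.2))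
              ++ (bs.dropWhile pred).map (fun p => totalSteps_DP_alt (p.1 :: p.2)) := by
          rw [← List.map_append, List.takeWhile_append_dropWhile]
        have htwle : ((bs.takeWhile pred).map
              (fun p => totalSteps_DP_alt (p.1 :: p.2))).foldr max 0
            ≤ (bWhile a 0 (stks bs)).1 := by
          apply foldr_max_le
          · intro x hx
            obtain ⟨q, hq, rfl⟩ := List.mem_map.mp hx
            exact bWhile_fst_ge_popped a bs 0 q hq
          · exact bWhile_le a (stks bs) 0
        rw [hfl, hmaps, foldr_max_append, hfp, ← hfdw]
        omega
      rw [bWhile_stks_drop a bs 0,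
        show stks ((a, conc (bs.takeWhile pred)) :: bs.dropWhile pred)
          = (a, totalSteps_DP_alt (a :: conc (bs.takeWhile pred))) :: stks (bs.dropWhile pred)
          from rfl,
        hcur, hres]

-- ===== VERDICT (by name: the statement is the Claim_ definition above) =====
theorem totalSteps_DP_spec : Claim_equal_totalSteps_DP := by
  intro A _
  unfold Spec_totalSteps_DP
  obtain ⟨bs, hg, hc, hr⟩ := main_invariant A
  rw [A_eq_gFold, gFold_eq_gRec, hr]
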